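-- pv_equiv track=rewrite | github.com/AidenHerrera1031/Sudo-ID | ask_brain.py | confidence_label
-- ===== SOURCE A (Python) =====
-- def confidence_label(metas) -> str:
--     kinds = {str((meta or {}).get("kind", "")).strip() for meta in metas}
--     if "project_identity" in kinds:
--         return "high"
--     if "file_summary" in kinds or "decision_log" in kinds:
--         return "medium"
--     if "chat_summary" in kinds or "chat_log" in kinds:
--         return "low"
--     return "low"
-- ===== SOURCE B (Python) =====
-- _RANK = {
--     "project_identity": 3,
--     "file_summary": 2,
--     "decision_log": 2,
--     "chat_summary": 1,
--     "chat_log": 1,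
-- }
--
--
-- def confidence_label(metas) -> str:
--     best = 0
--     for meta in metas:
--         kind = str((meta or {}).get("kind", "")).strip()
--         best = max(best, _RANK.get(kind, 0))
--     if best == 3:
--         return "high"
--     if best == 2:
--         return "medium"
--     return "low"
-- ===== Notes on version B (the rewrite author's own statement) =====
-- stated objective: alternative
-- what changed: Replaces the set comprehension plus cascaded membership tests by a single fold that keeps the maximum priority rank (via a rank table) and translates the final rank to the label.
import Mathlib
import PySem

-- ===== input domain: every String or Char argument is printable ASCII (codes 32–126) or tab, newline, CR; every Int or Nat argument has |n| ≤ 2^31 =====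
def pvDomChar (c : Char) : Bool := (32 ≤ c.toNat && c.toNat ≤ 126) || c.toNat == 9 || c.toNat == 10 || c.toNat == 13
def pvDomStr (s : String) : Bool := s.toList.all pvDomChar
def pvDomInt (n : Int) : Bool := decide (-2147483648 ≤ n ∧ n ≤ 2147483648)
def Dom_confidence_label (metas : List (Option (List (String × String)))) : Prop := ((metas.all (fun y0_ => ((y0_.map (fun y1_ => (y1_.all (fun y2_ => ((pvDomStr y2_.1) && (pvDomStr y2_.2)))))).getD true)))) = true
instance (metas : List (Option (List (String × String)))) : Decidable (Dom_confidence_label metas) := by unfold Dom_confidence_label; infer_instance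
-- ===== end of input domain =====

-- B replaces A's set comprehension + cascaded membership tests by one fold keeping the maximum priority rank (alternative decomposition, same cost).
-- ===== PORT A =====
-- kind of one meta: str((meta or {}).get("kind", "")).strip()  (shared normalization, identical in A and B)
def pvKind (m : Option (List (String × String))) : String :=
  PySem.Str.strip ((PySem.Dict.mk (m.getD [])).getD "kind" "")

def confidence_label (metas : List (Option (List (String × String)))) : String :=
  let kinds : PySem.Set String := PySem.Set.ofList (metas.map pvKind)
  if PySem.Set.contains kinds "project_identity" then "high"
  else if PySem.Set.contains kinds "file_summary" || PySem.Set.contains kinds "decision_log" then "medium"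
  else if PySem.Set.contains kinds "chat_summary" || PySem.Set.contains kinds "chat_log" then "low"
  else "low"

-- ===== PORT B =====
def pvRANK : PySem.Dict String Int :=
  PySem.Dict.mk
    [("project_identity", 3), ("file_summary", 2), ("decision_log", 2),
     ("chat_summary", 1), ("chat_log", 1)]

def confidence_label_alt (metas : List (Option (List (String × String)))) : String :=
  let best : Int := metas.foldl (fun best m => max best (pvRANK.getD (pvKind m) 0)) 0
  if best == 3 then "high"
  else if best == 2 then "medium"
  else "low"

-- ===== PRECONDITION & SPEC =====
def Spec_confidence_label (metas : List (Option (List (String × String)))) (out : String) : Prop := out = confidence_label_alt metas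
instance (metas : List (Option (List (String × String)))) (out : String) : Decidable (Spec_confidence_label metas out) := by unfold Spec_confidence_label; infer_instance

-- ===== CLAIM (what is proved, stated in full; the proofs are below) =====
def Claim_equal_confidence_label : Prop := ∀ (metas : List (Option (List (String × String)))), Dom_confidence_label metas → Spec_confidence_label metas (confidence_label metas)

-- ===== LEMMAS AND PROOFS =====
theorem pvRankOf_eq (k : String) :
    pvRANK.getD k 0 =
      if k = "project_identity" then 3
      else if k = "file_summary" ∨ k = "decision_log" then 2
      else if k = "chat_summary" ∨ k = "chat_log" then 1
      else 0 := by
  simp only [pvRANK, PySem.Dict.getD_eq_get?_getD, PySem.Dict.get?_mk_cons, beq_iff_eq]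
  split_ifs <;> simp_all [PySem.Dict.get?, eq_comm]

-- B's fold computes the maximum rank present among the kinds
theorem pv_fold_char (metas : List (Option (List (String × String)))) :
    ∀ acc : Int, 0 ≤ acc →
    metas.foldl (fun best m => max best (pvRANK.getD (pvKind m) 0)) acc =
      max acc
        (if metas.any (fun m => pvKind m == "project_identity") then 3
         else if metas.any (fun m => pvKind m == "file_summary" || pvKind m == "decision_log") then 2
         else if metas.any (fun m => pvKind m == "chat_summary" || pvKind m == "chat_log") then 1
         else 0) := by
  induction metas with
  | nil => intro acc h; simp; omega
  | cons m ms ih =>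
      intro acc h
      have hr := pvRankOf_eq (pvKind m)
      simp only [List.foldl_cons, List.any_cons]
      rw [hr, ih _ (le_trans h (le_max_left _ _))]
      by_cases h1 : pvKind m = "project_identity" <;>
        by_cases h2 : pvKind m = "file_summary" <;>
        by_cases h3 : pvKind m = "decision_log" <;>
        by_cases h4 : pvKind m = "chat_summary" <;>
        by_cases h5 : pvKind m = "chat_log" <;>
        simp [h1, h2, h3, h4, h5] <;> split_ifs <;> omega

-- membership in A's set of kinds = an 'any' scan over the metas
theorem pv_contains (l : List String) (k : String) :
    PySem.Set.contains (PySem.Set.ofList l) k = l.any (fun x => x == k) := by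
  simp [PySem.Set.contains_eq_listContains, List.any_beq', PySem.Set.mem_ofList]

theorem pv_any_or {α : Type} (l : List α) (p q : α → Bool) :
    (l.any fun x => p x || q x) = (l.any p || l.any q) := by
  induction l with
  | nil => rfl
  | cons a l ih =>
      simp only [List.any_cons, ih]
      cases p a <;> cases q a <;> cases l.any p <;> cases l.any q <;> rfl

-- ===== VERDICT (by name: the statement is the Claim_ definition above) =====
theorem confidence_label_spec : Claim_equal_confidence_label := by
  intro metas _
  unfold Spec_confidence_label confidence_label confidence_label_alt
  simp only [pv_contains, List.any_map, Function.comp_def]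
  rw [pv_fold_char metas 0 le_rfl, pv_any_or, pv_any_or]
  by_cases c1 : metas.any (fun m => pvKind m == "project_identity") = true <;>
    by_cases c2 : ((metas.any fun m => pvKind m == "file_summary") || metas.any fun m => pvKind m == "decision_log") = true <;>
    by_cases c3 : ((metas.any fun m => pvKind m == "chat_summary") || metas.any fun m => pvKind m == "chat_log") = true <;>
    simp [c1, c2, c3]
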